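-- pv_equiv track=rewrite | github.com/CharlesAttend/Recipe-chooser | I_Prétraitement.py | getCleanCsvIngredientList
-- ===== SOURCE A (Python) =====
-- def ingredientCleaner(ingredient):
--     """
--     :but: Determine si un ingredient composé de plusieurs mots indésirables. Si oui les élimines
--     :type: String -> String
--
--     :exemple:
--     Transformer les : "3 tablespoons fajita seasoning" en "fajita seasoning"
--     >>> ingredient_cleaner("3 tablespoons fajita seasoning")
--     'fajita seasoning'
--     """
--     clean_ingredient = ""
--     for j in ingredient.split(' '):
--         j = j.lower()
--         if j in ["powder", "tablespoon", "pound", 'pounds', 'package',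
--                 'tablespoons', 'cups', 'small', 'large', 'cup', "chopped", 'ounce', 'fluid']:
--             # return False
--             continue
--         elif j == '' or j[0] == "(" or j[0] == "'" or j[-1:] == ")":
--             # return False
--             continue
--         else:
--             try:
--                 int(j[0])
--                 continue
--                 # return False
--             except:
--                 clean_ingredient = clean_ingredient + j + " "
--     return clean_ingredient[:-1]
--
-- def getCleanCsvIngredientList(csv):
--     """
--     :but:   Return une liste des ingredients du csv clean
--             + On en profite pour faire un nombre d'ocurence de l'ingredient
--     :param: Iterable -> list of list
--
--     :exemple:
--     >>> getCleanCsvIngredientList(['yeast,water,white sugar,salt,egg,butter,flour,butter', 'flour,salt,baking powder,poppy,butter,vegetable oil,egg,milk,white sugar,vanilla,almond,orange juice,butter,almond,vanilla,sugar'])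
--     [['yeast', 'water', 'white sugar', 'salt', 'egg', 'butter', 'flour', 'butter'], ['flour', 'salt', 'baking', 'poppy', 'butter', 'vegetable oil', 'egg', 'milk', 'white sugar', 'vanilla', 'almond', 'orange juice', 'butter', 'almond', 'vanilla', 'sugar']]
--     """
--     lofl, d = list(), dict() #lofl = List Of List
--     # d= {"3 tablespoons fajita seasoning": 'fajita seasoning'"
--     #     "flour": 'flour'}
--     for igrd_list in csv:
--         l = []
--         for igrd in igrd_list.split(','):
--             try:
--                 l.append(d[igrd])
--             except:
--                 clean_igrd = ingredientCleaner(igrd)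
--                 d[igrd] = clean_igrd
--                 l.append(clean_igrd)
--         lofl.append(l)
--     return lofl
-- ===== SOURCE B (Python) =====
-- _STOP = {"powder", "tablespoon", "pound", "pounds", "package",
--          "tablespoons", "cups", "small", "large", "cup", "chopped", "ounce", "fluid"}
--
-- def _cleanIngredient(ingredient):
--     kept = [w for w in (t.lower() for t in ingredient.split(' '))
--             if w not in _STOP
--             and w != ''
--             and w[0] != '(' and w[0] != "'"
--             and w[-1] != ')'
--             and w[0] not in '0123456789']
--     return ' '.join(kept)
--
-- def getCleanCsvIngredientList(csv):
--     return [[_cleanIngredient(i) for i in row.split(',')] for row in csv]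
-- ===== Notes on version B (the rewrite author's own statement) =====
-- stated objective: simpler
-- what changed: B drops A's memoization dict and try/except lookup entirely, computing the result as a plain nested comprehension, and replaces the cleaner's string-accumulator-with-trailing-space-strip by a filter-and-join comprehension over the lower-cased words.
import Mathlib
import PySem

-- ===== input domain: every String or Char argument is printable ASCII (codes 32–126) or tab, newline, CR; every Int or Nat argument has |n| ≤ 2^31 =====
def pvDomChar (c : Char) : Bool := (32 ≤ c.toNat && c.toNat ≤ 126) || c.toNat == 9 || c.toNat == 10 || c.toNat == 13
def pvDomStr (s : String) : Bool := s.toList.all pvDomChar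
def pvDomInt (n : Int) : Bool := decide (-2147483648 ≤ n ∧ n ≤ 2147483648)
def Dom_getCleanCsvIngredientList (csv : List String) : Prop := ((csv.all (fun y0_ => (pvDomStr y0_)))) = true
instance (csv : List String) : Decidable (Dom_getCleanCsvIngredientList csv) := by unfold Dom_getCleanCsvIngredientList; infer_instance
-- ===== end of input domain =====

-- B drops A's memoization dict and its try/except lookup: the result is a plain nested
-- comprehension (map of maps) and the cleaner is a filter-and-join comprehension instead of
-- A's string accumulator with a trailing-space strip; same return value (objective: simpler).

-- ===== PORT A =====
-- the unwanted-word list of ingredientCleaner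
def pvUnits : List String := ["powder", "tablespoon", "pound", "pounds", "package",
  "tablespoons", "cups", "small", "large", "cup", "chopped", "ounce", "fluid"]

-- ingredientCleaner, word loop over List Char; j[0] is read with headD ' ' only behind the
-- j ≠ [] guard (short-circuit order as in Python); int(j[0]) is PySem.Int.ofChars? of the
-- one-character string; clean_ingredient[:-1] is PySem.List.slice … (-1).
def ingredientCleaner (ingredient : String) : String :=
  let clean : List Char :=
    (PySem.Chars.splitOn ingredient.toList [' ']).foldl (fun acc w =>
      let j : List Char := PySem.Chars.lower w
      if pvUnits.contains (String.ofList j) then acc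
      else if j = [] ∨ j.headD ' ' = '(' ∨ j.headD ' ' = '\'' ∨
              PySem.List.slice j (some (-1)) none = [')'] then acc
      else if (PySem.Int.ofChars? [j.headD ' ']).isSome then acc
      else acc ++ j ++ [' ']) []
  String.ofList (PySem.List.slice clean none (some (-1)))

-- getCleanCsvIngredientList: fold over the csv rows carrying (lofl, d); the try/except dict
-- lookup is the match on d.get?.
def getCleanCsvIngredientList (csv : List String) : List (List String) :=
  let r :=
    csv.foldl (fun (st : List (List String) × PySem.Dict String String) row =>
      let inner :=
        (PySem.Str.split? row ",").getD [] |>.foldl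
          (fun (st2 : List String × PySem.Dict String String) igrd =>
            match st2.2.get? igrd with
            | some v => (st2.1 ++ [v], st2.2)
            | none =>
              let c := ingredientCleaner igrd
              (st2.1 ++ [c], st2.2.insert igrd c))
          ([], st.2)
      (st.1 ++ [inner.1], inner.2)) ([], PySem.Dict.empty)
  r.1

-- ===== PORT B =====
-- B's one-word filter: all guards of the comprehension in one boolean; w[0]/w[-1] are read
-- with headD/pyGetD defaults only reachable when w ≠ [] (short-circuit order as in Python)
def pvKeep (w : List Char) : Bool :=
  !(pvUnits.contains (String.ofList w)) &&
  !(w = []) &&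
  !(w.headD ' ' = '(') && !(w.headD ' ' = '\'') &&
  !(PySem.List.pyGetD w (-1) ' ' = ')') &&
  !(("0123456789".toList).contains (w.headD ' '))

-- ' '.join of the kept lower-cased words
def cleanIngredient_alt (ingredient : String) : String :=
  String.ofList (PySem.Chars.join [' ']
    (((PySem.Chars.splitOn ingredient.toList [' ']).map PySem.Chars.lower).filter pvKeep))

def getCleanCsvIngredientList_alt (csv : List String) : List (List String) :=
  csv.map (fun row => ((PySem.Str.split? row ",").getD []).map cleanIngredient_alt)

-- ===== PRECONDITION & SPEC =====
def Spec_getCleanCsvIngredientList (csv : List String) (out : List (List String)) : Prop := out = getCleanCsvIngredientList_alt csv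
instance (csv : List String) (out : List (List String)) : Decidable (Spec_getCleanCsvIngredientList csv out) := by unfold Spec_getCleanCsvIngredientList; infer_instance

-- ===== CLAIM (what is proved, stated in full; the proofs are below) =====
def Claim_equal_getCleanCsvIngredientList : Prop := ∀ (csv : List String), Dom_getCleanCsvIngredientList csv → Spec_getCleanCsvIngredientList csv (getCleanCsvIngredientList csv)

-- ===== LEMMAS AND PROOFS =====

-- every character of a piece of splitOn comes from the split string
theorem pv_mem_splitOn_go (sep : List Char) (fuel : Nat) :
    ∀ (l cur : List Char) (acc : List (List Char)) (p : List Char),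
      p ∈ PySem.Chars.splitOn.go sep fuel l cur acc →
      ∀ c ∈ p, c ∈ l ∨ c ∈ cur ∨ ∃ q ∈ acc, c ∈ q := by
  induction fuel with
  | zero =>
    intro l cur acc p hp c hc
    rw [PySem.Chars.splitOn.go] at hp
    simp at hp
    rcases hp with hp | hp
    · exact Or.inr (Or.inr ⟨p, hp, hc⟩)
    · subst hp; simp at hc; rcases hc with hc | hc
      · exact Or.inr (Or.inl hc)
      · exact Or.inl hc
  | succ fuel ih =>
    intro l cur acc p hp c hc
    rcases l with _ | ⟨x, rest⟩
    · have hgo : PySem.Chars.splitOn.go sep (fuel+1) [] cur acc = (cur.reverse :: acc).reverse := by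
        rw [PySem.Chars.splitOn.go]
        omega
      rw [hgo] at hp
      simp at hp
      rcases hp with hp | hp
      · exact Or.inr (Or.inr ⟨p, hp, hc⟩)
      · subst hp; simp at hc; exact Or.inr (Or.inl hc)
    ·
      rw [PySem.Chars.splitOn.go] at hp
      by_cases hpre : sep.isPrefixOf (x :: rest) = true
      · rw [if_pos hpre] at hp
        rcases ih _ _ _ _ hp c hc with h | h | ⟨q, hq, hcq⟩
        · exact Or.inl (List.mem_of_mem_drop h)
        · simp at h
        · simp at hq
          rcases hq with hq | hq
          · subst hq; simp at hcq; exact Or.inr (Or.inl hcq)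
          · exact Or.inr (Or.inr ⟨q, hq, hcq⟩)
      · rw [if_neg hpre] at hp
        rcases ih _ _ _ _ hp c hc with h | h | h
        · exact Or.inl (List.mem_cons_of_mem _ h)
        · simp at h
          rcases h with h | h
          · subst h; exact Or.inl (List.mem_cons_self)
          · exact Or.inr (Or.inl h)
        · exact Or.inr (Or.inr h)

theorem pv_mem_splitOn (s sep p : List Char) (hp : p ∈ PySem.Chars.splitOn s sep) :
    ∀ c ∈ p, c ∈ s := by
  intro c hc
  rcases pv_mem_splitOn_go sep (s.length + 1) s [] [] p hp c hc with h | h | ⟨q, hq, _⟩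
  · exact h
  · simp at h
  · simp at hq

-- int(c) on a single domain character succeeds exactly for the ASCII digits
theorem pv_digit128 : ∀ n : Nat, n < 128 →
    ((PySem.Int.ofChars? [Char.ofNat n]).isSome
      = (("0123456789".toList).contains (Char.ofNat n))) := by decide

theorem pv_digit (c : Char) (h : pvDomChar c = true) :
    (PySem.Int.ofChars? [c]).isSome = ("0123456789".toList).contains c := by
  have h128 : c.toNat < 128 := by
    simp [pvDomChar] at h
    omega
  have := pv_digit128 c.toNat h128
  rwa [Char.ofNat_toNat] at this

-- lowercasing keeps a character inside the ASCII domain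
theorem pv_lower128 : ∀ n : Nat, n < 128 → pvDomChar (Char.ofNat n) = true →
    pvDomChar (PySem.Chars.lowerChar (Char.ofNat n)) = true := by decide

theorem pv_lower_dom (c : Char) (h : pvDomChar c = true) :
    pvDomChar (PySem.Chars.lowerChar c) = true := by
  have h128 : c.toNat < 128 := by
    simp [pvDomChar] at h
    omega
  have := pv_lower128 c.toNat h128
  rw [Char.ofNat_toNat] at this
  exact this h

-- '[:-1] of words-each-followed-by-a-space' is ' '.join(words)
theorem pv_dropLast_flat (parts : List (List Char)) :
    (parts.flatMap (fun w => w ++ [' '])).dropLast = List.intercalate [' '] parts := by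
  induction parts with
  | nil => simp [List.intercalate]
  | cons p rest ih =>
    rcases rest with _ | ⟨q, rest'⟩
    · simp [List.intercalate]
    · rw [List.flatMap_cons,
        show [' '].intercalate (p :: q :: rest') = p ++ [' '] ++ [' '].intercalate (q :: rest') from by
          simp [List.intercalate]]
      have hne : ((q :: rest').flatMap (fun w => w ++ [' '])) ≠ [] := by
        simp
      rw [List.dropLast_append_of_ne_nil hne, ih]

-- j[-1:] == ")" and j[-1] == ')' agree (both false on the empty word)
theorem pv_last_eq (j : List Char) (hne : j ≠ []) :
    (PySem.List.slice j (some (-1)) none = [')']) ↔ PySem.List.pyGetD j (-1) ' ' = ')' := by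
  rw [PySem.List.slice_from_neg_one, PySem.List.pyGetD_neg_one j ' ' hne,
    List.drop_length_sub_one hne]
  simp

theorem pv_keep_stop (j : List Char) (h1 : pvUnits.contains (String.ofList j) = true) :
    pvKeep j = false := by
  unfold pvKeep
  rw [h1]
  rfl

theorem pv_keep_head (j : List Char) (c : Char) (h : j.headD ' ' = c)
    (hc : c = '(' ∨ c = '\'') : pvKeep j = false := by
  unfold pvKeep
  rw [List.headD_eq_head?_getD] at h
  rcases hc with rfl | rfl <;> simp [h]

theorem pv_keep_rb (j : List Char) (h : PySem.List.pyGetD j (-1) ' ' = ')') :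
    pvKeep j = false := by
  unfold pvKeep
  simp [h]

theorem pv_keep_digit (j : List Char) (h : ("0123456789".toList).contains (j.headD ' ') = true) :
    pvKeep j = false := by
  unfold pvKeep
  rw [List.headD_eq_head?_getD] at h
  simp at h
  rcases h with h|h|h|h|h|h|h|h|h|h <;> simp [h]

theorem pv_keep_true (j : List Char)
    (h1 : pvUnits.contains (String.ofList j) = false)
    (hne : j ≠ [])
    (hpar : ¬ j.headD ' ' = '(') (hquo : ¬ j.headD ' ' = '\'')
    (hrb : ¬ PySem.List.pyGetD j (-1) ' ' = ')')
    (hd : ("0123456789".toList).contains (j.headD ' ') = false) :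
    pvKeep j = true := by
  unfold pvKeep
  rw [List.headD_eq_head?_getD] at hpar hquo hd
  simp at hd
  have h1' : String.ofList j ∉ pvUnits := by
    simpa using h1
  simp [h1', hne, hpar, hquo, hrb, hd]

theorem pv_bodyj (j : List Char) (hj : ∀ c ∈ j, pvDomChar c = true) (acc : List Char) :
    (if pvUnits.contains (String.ofList j) then acc
     else if j = [] ∨ j.headD ' ' = '(' ∨ j.headD ' ' = '\'' ∨
             PySem.List.slice j (some (-1)) none = [')'] then acc
     else if (PySem.Int.ofChars? [j.headD ' ']).isSome then acc
     else acc ++ j ++ [' '])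
    = acc ++ (if pvKeep j then j ++ [' '] else []) := by
  by_cases h1 : pvUnits.contains (String.ofList j)
  · rw [if_pos h1, pv_keep_stop j h1]; simp
  · by_cases h2 : j = [] ∨ j.headD ' ' = '(' ∨ j.headD ' ' = '\'' ∨
        PySem.List.slice j (some (-1)) none = [')']
    · rw [if_neg h1, if_pos h2]
      have hkf : pvKeep j = false := by
        rcases h2 with h | h | h | h
        · unfold pvKeep; simp [h]
        · exact pv_keep_head j _ h (Or.inl rfl)
        · exact pv_keep_head j _ h (Or.inr rfl)
        · have hne : j ≠ [] := by
            rintro rfl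
            rw [PySem.List.slice_from_neg_one] at h
            simp at h
          exact pv_keep_rb j ((pv_last_eq j hne).mp h)
      rw [hkf]; simp
    · push Not at h2
      obtain ⟨hne, hpar, hquo, hrb⟩ := h2
      rw [if_neg h1, if_neg (by push Not; exact ⟨hne, hpar, hquo, hrb⟩)]
      have hc0dom : pvDomChar (j.headD ' ') = true := by
        rcases j with _ | ⟨c0, t⟩
        · exact absurd rfl hne
        · exact hj _ List.mem_cons_self
      have hdig := pv_digit (j.headD ' ') hc0dom
      by_cases h3 : (PySem.Int.ofChars? [j.headD ' ']).isSome
      · rw [if_pos h3, pv_keep_digit j (by rw [← hdig]; exact h3)]; simp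
      · rw [if_neg h3]
        have hd : (("0123456789".toList).contains (j.headD ' ')) = false := by
          rw [← hdig]; simpa using h3
        have hrb2 : ¬ PySem.List.pyGetD j (-1) ' ' = ')' := fun hx =>
          hrb ((pv_last_eq j hne).mpr hx)
        rw [pv_keep_true j (by simpa using h1) hne hpar hquo hrb2 hd]
        simp

theorem pv_body (w : List Char) (hw : ∀ c ∈ w, pvDomChar c = true) (acc : List Char) :
    (if pvUnits.contains (String.ofList (PySem.Chars.lower w)) then acc
     else if PySem.Chars.lower w = [] ∨ (PySem.Chars.lower w).headD ' ' = '(' ∨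
             (PySem.Chars.lower w).headD ' ' = '\'' ∨
             PySem.List.slice (PySem.Chars.lower w) (some (-1)) none = [')'] then acc
     else if (PySem.Int.ofChars? [(PySem.Chars.lower w).headD ' ']).isSome then acc
     else acc ++ PySem.Chars.lower w ++ [' '])
    = acc ++ (if pvKeep (PySem.Chars.lower w) then PySem.Chars.lower w ++ [' '] else []) := by
  apply pv_bodyj
  intro c hc
  simp [PySem.Chars.lower] at hc
  obtain ⟨a, ha, rfl⟩ := hc
  exact pv_lower_dom a (hw a ha)

theorem pv_flatMap_if {α : Type} (p : α → Bool) (g : α → List Char) (l : List α) :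
    l.flatMap (fun x => if p x then g x else []) = (l.filter p).flatMap g := by
  induction l with
  | nil => rfl
  | cons x t ih =>
    by_cases hx : p x <;> simp [hx, ih]

theorem pv_cleaner_eq (s : String) (h : pvDomStr s = true) :
    ingredientCleaner s = cleanIngredient_alt s := by
  unfold ingredientCleaner cleanIngredient_alt
  have hdom : ∀ w ∈ PySem.Chars.splitOn s.toList [' '], ∀ c ∈ w, pvDomChar c = true := by
    intro w hw c hc
    have hcs : c ∈ s.toList := pv_mem_splitOn s.toList [' '] w hw c hc
    simp [pvDomStr, List.all_eq_true] at h
    exact h c hcs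
  rw [PySem.List.foldl_congr_mem _ _
      (fun acc w => acc ++ (if pvKeep (PySem.Chars.lower w) then PySem.Chars.lower w ++ [' '] else [])) _
      (fun acc w hw => pv_body w (hdom w hw) acc)]
  rw [PySem.List.foldl_append_eq_flatMap
      (fun w => (if pvKeep (PySem.Chars.lower w) then PySem.Chars.lower w ++ [' '] else []))]
  rw [List.nil_append]
  rw [pv_flatMap_if (fun w => pvKeep (PySem.Chars.lower w)) (fun w => PySem.Chars.lower w ++ [' '])]
  show String.ofList (PySem.List.slice
      (List.flatMap (fun w => PySem.Chars.lower w ++ [' '])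
        (List.filter (fun w => pvKeep (PySem.Chars.lower w)) (PySem.Chars.splitOn s.toList [' '])))
      none (some (-1))) = _
  rw [PySem.List.slice_to_neg_one]
  have hfm : (List.filter (fun w => pvKeep (PySem.Chars.lower w))
        (PySem.Chars.splitOn s.toList [' '])).flatMap (fun w => PySem.Chars.lower w ++ [' '])
      = (((PySem.Chars.splitOn s.toList [' ']).map PySem.Chars.lower).filter pvKeep).flatMap
          (fun j => j ++ [' ']) := by
    rw [List.filter_map, List.flatMap_map]
    rfl
  rw [hfm, pv_dropLast_flat]
  rfl

def pvInv (d : PySem.Dict String String) : Prop :=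
  ∀ k v, d.get? k = some v → v = ingredientCleaner k

theorem pv_inner (igrds : List String) :
    ∀ (acc : List String) (d : PySem.Dict String String), pvInv d →
      (igrds.foldl (fun (st2 : List String × PySem.Dict String String) igrd =>
          match st2.2.get? igrd with
          | some v => (st2.1 ++ [v], st2.2)
          | none =>
            let c := ingredientCleaner igrd
            (st2.1 ++ [c], st2.2.insert igrd c)) (acc, d)).1
        = acc ++ igrds.map ingredientCleaner ∧
      pvInv (igrds.foldl (fun (st2 : List String × PySem.Dict String String) igrd =>
          match st2.2.get? igrd with
          | some v => (st2.1 ++ [v], st2.2)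
          | none =>
            let c := ingredientCleaner igrd
            (st2.1 ++ [c], st2.2.insert igrd c)) (acc, d)).2 := by
  induction igrds with
  | nil => intro acc d hd; exact ⟨by simp, hd⟩
  | cons x t ih =>
    intro acc d hd
    simp only [List.foldl_cons]
    rcases hx : d.get? x with _ | v
    · have hd' : pvInv (d.insert x (ingredientCleaner x)) := by
        intro k v hkv
        rw [PySem.Dict.get?_insert] at hkv
        split_ifs at hkv with hk
        · subst hk; exact (Option.some.inj hkv).symm
        · exact hd k v hkv
      obtain ⟨h1, h2⟩ := ih (acc ++ [ingredientCleaner x]) (d.insert x (ingredientCleaner x)) hd'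
      constructor
      · rw [h1]; simp
      · exact h2
    · have hv : v = ingredientCleaner x := hd x v hx
      obtain ⟨h1, h2⟩ := ih (acc ++ [v]) d hd
      constructor
      · rw [h1, hv]; simp
      · exact h2

theorem pv_outer (csv : List String) :
    ∀ (acc : List (List String)) (d : PySem.Dict String String), pvInv d →
      (csv.foldl (fun (st : List (List String) × PySem.Dict String String) row =>
        let inner :=
          (PySem.Str.split? row ",").getD [] |>.foldl
            (fun (st2 : List String × PySem.Dict String String) igrd =>
              match st2.2.get? igrd with
              | some v => (st2.1 ++ [v], st2.2)
              | none =>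
                let c := ingredientCleaner igrd
                (st2.1 ++ [c], st2.2.insert igrd c))
            ([], st.2)
        (st.1 ++ [inner.1], inner.2)) (acc, d)).1
      = acc ++ csv.map (fun row => ((PySem.Str.split? row ",").getD []).map ingredientCleaner) := by
  induction csv with
  | nil => intro acc d hd; simp
  | cons row t ih =>
    intro acc d hd
    simp only [List.foldl_cons]
    obtain ⟨h1, h2⟩ := pv_inner ((PySem.Str.split? row ",").getD []) [] d hd
    rw [show ((PySem.Str.split? row ",").getD [] |>.foldl
        (fun (st2 : List String × PySem.Dict String String) igrd =>
          match st2.2.get? igrd with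
          | some v => (st2.1 ++ [v], st2.2)
          | none =>
            let c := ingredientCleaner igrd
            (st2.1 ++ [c], st2.2.insert igrd c)) ([], d)).1
      = ((PySem.Str.split? row ",").getD []).map ingredientCleaner from by rw [h1]; simp]
    rw [ih (acc ++ [((PySem.Str.split? row ",").getD []).map ingredientCleaner]) _ h2]
    simp

theorem pv_main : ∀ (csv : List String), Dom_getCleanCsvIngredientList csv →
    getCleanCsvIngredientList csv = getCleanCsvIngredientList_alt csv := by
  intro csv hdom
  unfold getCleanCsvIngredientList getCleanCsvIngredientList_alt
  have hinv : pvInv PySem.Dict.empty := by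
    intro k v hkv
    rw [PySem.Dict.get?_empty] at hkv
    exact absurd hkv (by simp)
  rw [show (csv.foldl (fun (st : List (List String) × PySem.Dict String String) row =>
        let inner :=
          (PySem.Str.split? row ",").getD [] |>.foldl
            (fun (st2 : List String × PySem.Dict String String) igrd =>
              match st2.2.get? igrd with
              | some v => (st2.1 ++ [v], st2.2)
              | none =>
                let c := ingredientCleaner igrd
                (st2.1 ++ [c], st2.2.insert igrd c))
            ([], st.2)
        (st.1 ++ [inner.1], inner.2)) ([], PySem.Dict.empty)).1
      = [] ++ csv.map (fun row => ((PySem.Str.split? row ",").getD []).map ingredientCleaner)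
      from pv_outer csv [] PySem.Dict.empty hinv]
  rw [List.nil_append]
  apply List.map_congr_left
  intro row hrow
  apply List.map_congr_left
  intro igrd higrd
  apply pv_cleaner_eq
  have hsplit : (PySem.Str.split? row ",").getD []
      = (PySem.Chars.splitOn row.toList [',']).map String.ofList := by rfl
  rw [hsplit] at higrd
  obtain ⟨p, hp, rfl⟩ := List.mem_map.mp higrd
  have hrowdom : pvDomStr row = true := by
    simp [Dom_getCleanCsvIngredientList, List.all_eq_true] at hdom
    exact hdom row hrow
  simp [pvDomStr, List.all_eq_true] at hrowdom ⊢
  intro c hc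
  exact hrowdom c (pv_mem_splitOn row.toList [','] p hp c hc)

-- ===== VERDICT (by name: the statement is the Claim_ definition above) =====
theorem getCleanCsvIngredientList_spec : Claim_equal_getCleanCsvIngredientList := by
  intro csv hdom
  exact pv_main csv hdom
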